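-- pv_equiv track=rewrite | github.com/DawnMarie/sync-services | data_models/activity.py | _format_training_message
-- ===== SOURCE A (Python) =====
-- def _format_training_message(message):
--     messages = {
--         'NO_': 'No Benefit',
--         'MINOR_': 'Some Benefit',
--         'RECOVERY_': 'Recovery',
--         'MAINTAINING_': 'Maintaining',
--         'IMPROVING_': 'Impacting',
--         'IMPACTING_': 'Impacting',
--         'HIGHLY_': 'Highly Impacting',
--         'OVERREACHING_': 'Overreaching'
--     }
--     for key, value in messages.items():
--         if message.startswith(key):
--             return value
--     return message
-- ===== SOURCE B (Python) =====
-- def _format_training_message(message):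
--     messages = {
--         'NO_': 'No Benefit',
--         'MINOR_': 'Some Benefit',
--         'RECOVERY_': 'Recovery',
--         'MAINTAINING_': 'Maintaining',
--         'IMPROVING_': 'Impacting',
--         'IMPACTING_': 'Impacting',
--         'HIGHLY_': 'Highly Impacting',
--         'OVERREACHING_': 'Overreaching'
--     }
--     head, sep, _tail = message.partition('_')
--     return messages.get(head + sep, message)
-- ===== Notes on version B (the rewrite author's own statement) =====
-- stated objective: idiomatic
-- what changed: Replaces the scan over all eight prefixes with startswith by deriving the one candidate key from the input via partition('_') and a single dict lookup with the message as default.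
import Mathlib
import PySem

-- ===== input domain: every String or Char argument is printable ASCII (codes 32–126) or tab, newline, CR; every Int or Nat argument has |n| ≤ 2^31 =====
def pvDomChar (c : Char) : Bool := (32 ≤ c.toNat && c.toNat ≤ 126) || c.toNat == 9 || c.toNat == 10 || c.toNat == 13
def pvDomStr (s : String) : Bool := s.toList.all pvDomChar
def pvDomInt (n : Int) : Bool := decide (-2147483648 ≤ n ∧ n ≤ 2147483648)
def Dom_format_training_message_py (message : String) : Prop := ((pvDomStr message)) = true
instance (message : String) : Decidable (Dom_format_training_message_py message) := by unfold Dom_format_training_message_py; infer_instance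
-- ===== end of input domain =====

-- B replaces A's startswith scan over all eight prefixes by deriving the single candidate
-- key from the input with partition('_') and doing one keyed dict lookup (idiomatic).

-- ===== PORT A =====
def msgsA : PySem.Dict String String := PySem.Dict.ofList
  [("NO_", "No Benefit"), ("MINOR_", "Some Benefit"), ("RECOVERY_", "Recovery"),
   ("MAINTAINING_", "Maintaining"), ("IMPROVING_", "Impacting"), ("IMPACTING_", "Impacting"),
   ("HIGHLY_", "Highly Impacting"), ("OVERREACHING_", "Overreaching")]

-- 'for key, value in messages.items(): if message.startswith(key): return value / return message'
def aLoop : List (String × String) → String → String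
  | [], m => m
  | (k, v) :: rest, m => if PySem.Str.startswith m k then v else aLoop rest m

def format_training_message_py (message : String) : String :=
  aLoop msgsA.items message

-- ===== PORT B =====
def msgsB : PySem.Dict String String := PySem.Dict.ofList
  [("NO_", "No Benefit"), ("MINOR_", "Some Benefit"), ("RECOVERY_", "Recovery"),
   ("MAINTAINING_", "Maintaining"), ("IMPROVING_", "Impacting"), ("IMPACTING_", "Impacting"),
   ("HIGHLY_", "Highly Impacting"), ("OVERREACHING_", "Overreaching")]

-- hand port of head + sep from message.partition('_') (exact: head is everything before
-- the first '_'; sep is "_" iff the message contains an underscore, else "")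
def partKey (message : String) : String :=
  let l := message.toList
  String.ofList (l.takeWhile (fun c => c ≠ '_') ++ (if '_' ∈ l then ['_'] else []))

def format_training_message_py_alt (message : String) : String :=
  PySem.Dict.getD msgsB (partKey message) message

-- ===== PRECONDITION & SPEC =====
def Spec_format_training_message_py (message : String) (out : String) : Prop := out = format_training_message_py_alt message
instance (message : String) (out : String) : Decidable (Spec_format_training_message_py message out) := by unfold Spec_format_training_message_py; infer_instance

-- ===== CLAIM (what is proved, stated in full; the proofs are below) =====
def Claim_equal_format_training_message_py : Prop := ∀ (message : String), Dom_format_training_message_py message → Spec_format_training_message_py message (format_training_message_py message)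

-- ===== LEMMAS AND PROOFS =====

-- a key 'ks ++ "_"' (ks underscore-free) is a prefix of l iff B's candidate characters equal it
lemma partKey_list_eq_iff (ks : List Char) (l : List Char) (h : '_' ∉ ks) :
    (ks ++ ['_']) <+: l ↔
      l.takeWhile (fun c => c ≠ '_') ++ (if '_' ∈ l then ['_'] else []) = ks ++ ['_'] := by
  induction ks generalizing l with
  | nil =>
    cases l with
    | nil => simp
    | cons c t =>
      by_cases hc : c = '_'
      · subst hc; simp [List.cons_prefix_cons]
      · simp [hc, List.cons_prefix_cons, Ne.symm hc]
  | cons a ks ih =>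
    have ha : a ≠ '_' := fun he => h (he ▸ List.mem_cons_self)
    have h' : '_' ∉ ks := fun hm => h (List.mem_cons_of_mem _ hm)
    cases l with
    | nil => simp
    | cons c t =>
      by_cases hc : c = '_'
      · subst hc
        simp [List.cons_prefix_cons, Ne.symm ha]
        exact fun he => absurd he ha
      · simp [hc, List.cons_prefix_cons, ih t h', eq_comm]

-- A takes a branch iff B's candidate key equals that branch's key
lemma startswith_iff_partKey (m k : String) (ks : List Char) (hk : k.toList = ks ++ ['_'])
    (h : '_' ∉ ks) : PySem.Str.startswith m k = true ↔ partKey m = k := by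
  rw [PySem.Str.startswith_eq, PySem.Chars.startswith_iff, hk,
    partKey_list_eq_iff _ _ h, partKey]
  constructor
  · intro he; simp only [he]; rw [← hk]; simp
  · intro he
    have : (String.ofList (m.toList.takeWhile (fun c => c ≠ '_') ++
        (if '_' ∈ m.toList then ['_'] else []))).toList = k.toList := congrArg String.toList he
    simpa [hk] using this

theorem format_training_message_py_spec_aux (m : String) :
    format_training_message_py m = format_training_message_py_alt m := by
  have e1 := startswith_iff_partKey m "NO_" ['N','O'] rfl (by decide)
  have e2 := startswith_iff_partKey m "MINOR_" ['M','I','N','O','R'] rfl (by decide)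
  have e3 := startswith_iff_partKey m "RECOVERY_" ['R','E','C','O','V','E','R','Y'] rfl (by decide)
  have e4 := startswith_iff_partKey m "MAINTAINING_" ['M','A','I','N','T','A','I','N','I','N','G'] rfl (by decide)
  have e5 := startswith_iff_partKey m "IMPROVING_" ['I','M','P','R','O','V','I','N','G'] rfl (by decide)
  have e6 := startswith_iff_partKey m "IMPACTING_" ['I','M','P','A','C','T','I','N','G'] rfl (by decide)
  have e7 := startswith_iff_partKey m "HIGHLY_" ['H','I','G','H','L','Y'] rfl (by decide)
  have e8 := startswith_iff_partKey m "OVERREACHING_" ['O','V','E','R','R','E','A','C','H','I','N','G'] rfl (by decide)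
  show aLoop msgsA.items m = PySem.Dict.getD msgsB (partKey m) m
  rw [show msgsA.items =
    [("NO_", "No Benefit"), ("MINOR_", "Some Benefit"), ("RECOVERY_", "Recovery"),
     ("MAINTAINING_", "Maintaining"), ("IMPROVING_", "Impacting"), ("IMPACTING_", "Impacting"),
     ("HIGHLY_", "Highly Impacting"), ("OVERREACHING_", "Overreaching")] from rfl]
  simp only [aLoop]
  split_ifs with h1 h2 h3 h4 h5 h6 h7 h8
  · rw [e1.mp h1]; rfl
  · rw [e2.mp h2]; rfl
  · rw [e3.mp h3]; rfl
  · rw [e4.mp h4]; rfl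
  · rw [e5.mp h5]; rfl
  · rw [e6.mp h6]; rfl
  · rw [e7.mp h7]; rfl
  · rw [e8.mp h8]; rfl
  · have n1 : partKey m ≠ "NO_" := fun he => h1 (e1.mpr he)
    have n2 : partKey m ≠ "MINOR_" := fun he => h2 (e2.mpr he)
    have n3 : partKey m ≠ "RECOVERY_" := fun he => h3 (e3.mpr he)
    have n4 : partKey m ≠ "MAINTAINING_" := fun he => h4 (e4.mpr he)
    have n5 : partKey m ≠ "IMPROVING_" := fun he => h5 (e5.mpr he)
    have n6 : partKey m ≠ "IMPACTING_" := fun he => h6 (e6.mpr he)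
    have n7 : partKey m ≠ "HIGHLY_" := fun he => h7 (e7.mpr he)
    have n8 : partKey m ≠ "OVERREACHING_" := fun he => h8 (e8.mpr he)
    rw [show msgsB = PySem.Dict.mk
      [("NO_", "No Benefit"), ("MINOR_", "Some Benefit"), ("RECOVERY_", "Recovery"),
       ("MAINTAINING_", "Maintaining"), ("IMPROVING_", "Impacting"), ("IMPACTING_", "Impacting"),
       ("HIGHLY_", "Highly Impacting"), ("OVERREACHING_", "Overreaching")] from rfl]
    simp [PySem.Dict.getD, PySem.Dict.get?,
      Ne.symm n1, Ne.symm n2, Ne.symm n3, Ne.symm n4,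
      Ne.symm n5, Ne.symm n6, Ne.symm n7, Ne.symm n8]

-- ===== VERDICT (by name: the statement is the Claim_ definition above) =====
theorem format_training_message_py_spec : Claim_equal_format_training_message_py := by
  intro m _
  exact format_training_message_py_spec_aux m
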